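-- pv_equiv track=rewrite | github.com/Sujeong-Baek/Programmers | Level 0/0.캐릭터의좌표.py | solution
-- ===== SOURCE A (Python) =====
-- def solution(keyinput, board):
--     key2move={"up":[0,1], "down":[0,-1], "left":[-1,0], "right":[1,0]}
--     r,c=0,0
--     for key in keyinput:
--         dr, dc = key2move[key]
--         nr, nc = r + dr, c + dc
--         if abs(nr)<=board[0]//2 and abs(nc)<=board[1]//2:
--             r, c = nr, nc
--     return [r,c]
-- ===== SOURCE B (Python) =====
-- MOVES = {"right": (1, 0), "left": (-1, 0), "up": (0, 1), "down": (0, -1)}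
--
-- def solution(keyinput, board):
--     deltas = [MOVES[key] for key in keyinput]
--     half_r, half_c = board[0] // 2, board[1] // 2
--     r = 0
--     for dr, _ in deltas:
--         if dr == 1 and r < half_r:
--             r += 1
--         elif dr == -1 and -half_r < r:
--             r -= 1
--     c = 0
--     for _, dc in deltas:
--         if dc == 1 and c < half_c:
--             c += 1
--         elif dc == -1 and -half_c < c:
--             c -= 1
--     return [r, c]
-- ===== Notes on version B (the rewrite author's own statement) =====
-- stated objective: alternative
-- what changed: Replaces A's single interleaved pass (per-key dict lookup, tentative move, abs-clamp on the coordinate pair) with a one-time translation of the keys to move deltas followed by two axis-specific passes, each stepping one coordinate under a boundary comparison against its own board dimension half; …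
-- outside the precondition, e.g. on solution([], []): A returns [0, 0], B raises IndexError; on solution(['left'], [1]): A returns [0, 0], B raises IndexError; on solution(['right'], [5, -3]): A returns [0, 0], B returns [1, 0]
import Mathlib
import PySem

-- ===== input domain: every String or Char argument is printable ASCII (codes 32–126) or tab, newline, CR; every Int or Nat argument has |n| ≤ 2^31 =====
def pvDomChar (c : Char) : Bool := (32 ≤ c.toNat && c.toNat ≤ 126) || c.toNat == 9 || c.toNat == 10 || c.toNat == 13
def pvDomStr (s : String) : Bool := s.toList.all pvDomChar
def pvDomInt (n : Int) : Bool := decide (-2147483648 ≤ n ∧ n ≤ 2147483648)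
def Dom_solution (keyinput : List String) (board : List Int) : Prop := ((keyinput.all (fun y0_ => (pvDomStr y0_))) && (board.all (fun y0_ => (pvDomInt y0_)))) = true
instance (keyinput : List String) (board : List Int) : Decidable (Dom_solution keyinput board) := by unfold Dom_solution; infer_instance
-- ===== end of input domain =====

-- B translates the keys to move deltas once, then runs two axis-specific passes with boundary comparisons instead of A's single interleaved pass with an abs-clamp on the pair; equal on well-formed boards (Pre_), same cost.


-- ===== PORT A =====
-- the dict key2move of A
def key2moveA : PySem.Dict String (Int × Int) :=
  PySem.Dict.ofList [("up", (0, 1)), ("down", (0, -1)), ("left", (-1, 0)), ("right", (1, 0))]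

-- loop body of A: lookup the move, read board[0], board[1], clamp-test the stepped position
def stepA (board : List Int) (rc : Int × Int) (key : String) : Int × Int :=
  match PySem.Dict.get? key2moveA key, PySem.List.pyGet? board 0, PySem.List.pyGet? board 1 with
  | some (dr, dc), some b0, some b1 =>
    let nr := rc.1 + dr
    let nc := rc.2 + dc
    if |nr| ≤ PySem.Int.floordiv b0 2 ∧ |nc| ≤ PySem.Int.floordiv b1 2 then (nr, nc) else rc
  | _, _, _ => rc   -- KeyError / IndexError in Python: outside Pre_

def solution (keyinput : List String) (board : List Int) : List Int :=
  let rc := keyinput.foldl (stepA board) (0, 0)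
  [rc.1, rc.2]

-- ===== PORT B =====
-- the dict MOVES of B
def key2moveB : PySem.Dict String (Int × Int) :=
  PySem.Dict.ofList [("right", (1, 0)), ("left", (-1, 0)), ("up", (0, 1)), ("down", (0, -1))]

-- the list comprehension [MOVES[key] for key in keyinput]; none = KeyError
def translateB : List String → Option (List (Int × Int))
  | [] => some []
  | k :: ks =>
    match PySem.Dict.get? key2moveB k, translateB ks with
    | some d, some ds => some (d :: ds)
    | _, _ => none

-- horizontal pass body of B
def stepH (half : Int) (r : Int) (d : Int × Int) : Int :=
  if d.1 = 1 ∧ r < half then r + 1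
  else if d.1 = -1 ∧ -half < r then r - 1
  else r

-- vertical pass body of B
def stepV (half : Int) (c : Int) (d : Int × Int) : Int :=
  if d.2 = 1 ∧ c < half then c + 1
  else if d.2 = -1 ∧ -half < c then c - 1
  else c

def solution_alt (keyinput : List String) (board : List Int) : List Int :=
  match translateB keyinput with
  | none => [0, 0]   -- KeyError in Python: outside Pre_
  | some deltas =>
    match PySem.List.pyGet? board 0, PySem.List.pyGet? board 1 with
    | some b0, some b1 =>
      let halfR := PySem.Int.floordiv b0 2
      let halfC := PySem.Int.floordiv b1 2
      [deltas.foldl (stepH halfR) 0, deltas.foldl (stepV halfC) 0]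
    | _, _ => [0, 0]   -- IndexError in Python: outside Pre_

-- ===== PRECONDITION & SPEC =====
-- Pre_ excludes inputs where A raises (an unknown key: KeyError); boards with fewer than two
-- entries, on which B reads both dimensions up front and raises IndexError while A's
-- short-circuiting 'and' (or an empty keyinput) can still return [0, 0]; and boards mixing a
-- negative and a nonnegative dimension, which describe no real board — a defensible corner on
-- which A's conjoined abs-clamp freezes both axes while B clamps each axis independently.
def Pre_solution (keyinput : List String) (board : List Int) : Prop :=
  (∀ k ∈ keyinput, k = "up" ∨ k = "down" ∨ k = "left" ∨ k = "right") ∧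
  2 ≤ board.length ∧
  ((0 ≤ board.getD 0 0 ∧ 0 ≤ board.getD 1 0) ∨ (board.getD 0 0 < 0 ∧ board.getD 1 0 < 0))
instance (keyinput : List String) (board : List Int) : Decidable (Pre_solution keyinput board) := by
  unfold Pre_solution; infer_instance

def pvWitness_solution : List String × List Int := (["up", "left", "left", "down"], [5, 3])

def Spec_solution (keyinput : List String) (board : List Int) (out : List Int) : Prop := out = solution_alt keyinput board
instance (keyinput : List String) (board : List Int) (out : List Int) : Decidable (Spec_solution keyinput board out) := by unfold Spec_solution; infer_instance

-- ===== CLAIM (what is proved, stated in full; the proofs are below) =====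
def Claim_equal_solution : Prop := ∀ (keyinput : List String) (board : List Int), Dom_solution keyinput board → Pre_solution keyinput board → Spec_solution keyinput board (solution keyinput board)

-- ===== LEMMAS AND PROOFS =====

lemma fold_split (b0 b1 : Int) (t : List Int) :
    ∀ (ks : List String), (∀ k ∈ ks, k = "up" ∨ k = "down" ∨ k = "left" ∨ k = "right") →
    ∀ (r c : Int), |r| ≤ PySem.Int.floordiv b0 2 → |c| ≤ PySem.Int.floordiv b1 2 →
      ∃ ds, translateB ks = some ds ∧
        ks.foldl (stepA (b0 :: b1 :: t)) (r, c) =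
          (ds.foldl (stepH (PySem.Int.floordiv b0 2)) r, ds.foldl (stepV (PySem.Int.floordiv b1 2)) c) := by
  intro ks hks
  induction ks with
  | nil => intro r c _ _; exact ⟨[], rfl, rfl⟩
  | cons k ks ih =>
    intro r c hr hc
    have hk := hks k (List.mem_cons_self ..)
    have hks' : ∀ k ∈ ks, k = "up" ∨ k = "down" ∨ k = "left" ∨ k = "right" :=
      fun k hk => hks k (List.mem_cons_of_mem _ hk)
    have hg0 : PySem.List.pyGet? (b0 :: b1 :: t) 0 = some b0 := by
      rw [show (0 : Int) = ((0 : Nat) : Int) from rfl, PySem.List.pyGet?_natCast]; rfl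
    have hg1 : PySem.List.pyGet? (b0 :: b1 :: t) 1 = some b1 := by
      rw [show (1 : Int) = ((1 : Nat) : Int) from rfl, PySem.List.pyGet?_natCast]; rfl
    have e0 : PySem.Int.floordiv b0 2 = b0 / 2 := PySem.Int.floordiv_eq_ediv_of_pos (by omega)
    have e1 : PySem.Int.floordiv b1 2 = b1 / 2 := PySem.Int.floordiv_eq_ediv_of_pos (by omega)
    rw [e0] at hr; rw [e1] at hc
    obtain ⟨d, hd, hstep, hinvH, hinvV⟩ :
        ∃ d, PySem.Dict.get? key2moveB k = some d ∧
          stepA (b0 :: b1 :: t) (r, c) k =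
            (stepH (PySem.Int.floordiv b0 2) r d, stepV (PySem.Int.floordiv b1 2) c d) ∧
          |stepH (PySem.Int.floordiv b0 2) r d| ≤ PySem.Int.floordiv b0 2 ∧
          |stepV (PySem.Int.floordiv b1 2) c d| ≤ PySem.Int.floordiv b1 2 := by
      rw [abs_le] at hr hc
      rcases hk with h | h | h | h <;> subst h <;>
        refine ⟨_, rfl, ?_, ?_, ?_⟩ <;>
        simp [stepA, stepH, stepV, hg0, hg1, e0, e1,
          show PySem.Dict.get? key2moveA "up" = some ((0 : Int), (1 : Int)) from rfl,
          show PySem.Dict.get? key2moveA "down" = some ((0 : Int), (-1 : Int)) from rfl,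
          show PySem.Dict.get? key2moveA "left" = some ((-1 : Int), (0 : Int)) from rfl,
          show PySem.Dict.get? key2moveA "right" = some ((1 : Int), (0 : Int)) from rfl,
          abs_le] <;>
        (try split_ifs) <;> first | omega | (simp [Prod.mk.injEq] <;> omega)
    obtain ⟨ds, htr, heq⟩ := ih hks' _ _ hinvH hinvV
    refine ⟨d :: ds, ?_, ?_⟩
    · simp [translateB, hd, htr]
    · simp only [List.foldl_cons, hstep, heq]

lemma translate_some :
    ∀ (ks : List String), (∀ k ∈ ks, k = "up" ∨ k = "down" ∨ k = "left" ∨ k = "right") →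
      ∃ ds, translateB ks = some ds := by
  intro ks hks
  induction ks with
  | nil => exact ⟨[], rfl⟩
  | cons k ks ih =>
    obtain ⟨ds, htr⟩ := ih (fun k hk => hks k (List.mem_cons_of_mem _ hk))
    have hk := hks k (List.mem_cons_self ..)
    rcases hk with h | h | h | h <;> subst h <;>
      [exact ⟨(0, 1) :: ds, by simp [translateB, htr, show PySem.Dict.get? key2moveB "up" = some ((0 : Int), (1 : Int)) from rfl]⟩;
       exact ⟨(0, -1) :: ds, by simp [translateB, htr, show PySem.Dict.get? key2moveB "down" = some ((0 : Int), (-1 : Int)) from rfl]⟩;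
       exact ⟨(-1, 0) :: ds, by simp [translateB, htr, show PySem.Dict.get? key2moveB "left" = some ((-1 : Int), (0 : Int)) from rfl]⟩;
       exact ⟨(1, 0) :: ds, by simp [translateB, htr, show PySem.Dict.get? key2moveB "right" = some ((1 : Int), (0 : Int)) from rfl]⟩]

lemma foldH_frozen (half : Int) (hle : half ≤ 0) :
    ∀ (ds : List (Int × Int)), ds.foldl (stepH half) 0 = 0 := by
  intro ds
  induction ds with
  | nil => rfl
  | cons d ds ih =>
    have : stepH half 0 d = 0 := by unfold stepH; split_ifs with h1 h2 <;> first | rfl | omega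
    simp only [List.foldl_cons, this]; exact ih

lemma foldV_frozen (half : Int) (hle : half ≤ 0) :
    ∀ (ds : List (Int × Int)), ds.foldl (stepV half) 0 = 0 := by
  intro ds
  induction ds with
  | nil => rfl
  | cons d ds ih =>
    have : stepV half 0 d = 0 := by unfold stepV; split_ifs with h1 h2 <;> first | rfl | omega
    simp only [List.foldl_cons, this]; exact ih

lemma foldA_frozen (b0 b1 : Int) (t : List Int)
    (h : PySem.Int.floordiv b0 2 < 0 ∨ PySem.Int.floordiv b1 2 < 0) :
    ∀ (ks : List String), (∀ k ∈ ks, k = "up" ∨ k = "down" ∨ k = "left" ∨ k = "right") →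
      ks.foldl (stepA (b0 :: b1 :: t)) ((0 : Int), (0 : Int)) = (0, 0) := by
  intro ks hks
  rw [PySem.Int.floordiv_eq_ediv_of_pos (show (0 : Int) < 2 by omega),
      PySem.Int.floordiv_eq_ediv_of_pos (show (0 : Int) < 2 by omega)] at h
  induction ks with
  | nil => rfl
  | cons k ks ih =>
    have hk := hks k (List.mem_cons_self ..)
    have hg0 : PySem.List.pyGet? (b0 :: b1 :: t) 0 = some b0 := by
      rw [show (0 : Int) = ((0 : Nat) : Int) from rfl, PySem.List.pyGet?_natCast]; rfl
    have hg1 : PySem.List.pyGet? (b0 :: b1 :: t) 1 = some b1 := by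
      rw [show (1 : Int) = ((1 : Nat) : Int) from rfl, PySem.List.pyGet?_natCast]; rfl
    have hstep : stepA (b0 :: b1 :: t) ((0 : Int), (0 : Int)) k = (0, 0) := by
      rcases hk with hE | hE | hE | hE <;> subst hE <;>
        simp [stepA, hg0, hg1,
          show PySem.Dict.get? key2moveA "up" = some ((0 : Int), (1 : Int)) from rfl,
          show PySem.Dict.get? key2moveA "down" = some ((0 : Int), (-1 : Int)) from rfl,
          show PySem.Dict.get? key2moveA "left" = some ((-1 : Int), (0 : Int)) from rfl,
          show PySem.Dict.get? key2moveA "right" = some ((1 : Int), (0 : Int)) from rfl,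
          abs_le] <;>
        intros <;> rcases h with h | h <;> omega
    simp only [List.foldl_cons, hstep]
    exact ih (fun k hk => hks k (List.mem_cons_of_mem _ hk))

-- ===== VERDICT (by name: the statement is the Claim_ definition above) =====
theorem solution_spec : Claim_equal_solution := by
  intro keyinput board _ hpre
  rcases hpre with ⟨hkeys, hlen, hsign⟩
  unfold Spec_solution
  match board, hlen with
  | b0 :: b1 :: t, _ =>
    have hsign' : (0 ≤ b0 ∧ 0 ≤ b1) ∨ (b0 < 0 ∧ b1 < 0) := by
      simpa [List.getD] using hsign
    have hg0 : PySem.List.pyGet? (b0 :: b1 :: t) 0 = some b0 := by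
      rw [show (0 : Int) = ((0 : Nat) : Int) from rfl, PySem.List.pyGet?_natCast]; rfl
    have hg1 : PySem.List.pyGet? (b0 :: b1 :: t) 1 = some b1 := by
      rw [show (1 : Int) = ((1 : Nat) : Int) from rfl, PySem.List.pyGet?_natCast]; rfl
    have e0 : PySem.Int.floordiv b0 2 = b0 / 2 := PySem.Int.floordiv_eq_ediv_of_pos (by omega)
    have e1 : PySem.Int.floordiv b1 2 = b1 / 2 := PySem.Int.floordiv_eq_ediv_of_pos (by omega)
    rcases hsign' with ⟨hb0, hb1⟩ | ⟨hb0, hb1⟩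
    · have habs0 : |(0 : Int)| ≤ PySem.Int.floordiv b0 2 := by rw [e0]; simp; omega
      have habs1 : |(0 : Int)| ≤ PySem.Int.floordiv b1 2 := by rw [e1]; simp; omega
      obtain ⟨ds, htr, heq⟩ := fold_split b0 b1 t keyinput hkeys 0 0 habs0 habs1
      simp only [solution, solution_alt, htr, hg0, hg1, heq]
    · obtain ⟨ds, htr⟩ := translate_some keyinput hkeys
      have hA := foldA_frozen b0 b1 t (Or.inl (by rw [e0]; omega)) keyinput hkeys
      have hH := foldH_frozen (PySem.Int.floordiv b0 2) (by rw [e0]; omega) ds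
      have hV := foldV_frozen (PySem.Int.floordiv b1 2) (by rw [e1]; omega) ds
      simp only [solution, solution_alt, htr, hg0, hg1, hA, hH, hV]
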